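-- pv_equiv track=rewrite | github.com/GIS-DHSIT/DocWain | src/kg/retrieval.py | _select_candidate_docs
-- ===== SOURCE A (Python) =====
-- from typing import Any, Dict, List, Optional, Sequence, Tuple
--
-- def _select_candidate_docs(entity_doc_map: Dict[str, List[str]]) -> List[str]:
--     if not entity_doc_map:
--         return []
--     doc_sets = [set(docs) for docs in entity_doc_map.values() if docs]
--     if not doc_sets:
--         return []
--     intersected = set.intersection(*doc_sets) if len(doc_sets) > 1 else doc_sets[0]
--     if intersected:
--         return sorted(intersected)
--     merged = set().union(*doc_sets)
--     return sorted(merged)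
-- ===== SOURCE B (Python) =====
-- from typing import Dict, List
--
-- def _select_candidate_docs(entity_doc_map: Dict[str, List[str]]) -> List[str]:
--     # One pass: concatenate each non-empty entity's distinct docs, count occurrences,
--     # keep docs seen by every non-empty entity; fall back to all docs seen.
--     occ: List[str] = []
--     n = 0
--     for docs in entity_doc_map.values():
--         if docs:
--             n += 1
--             occ.extend(dict.fromkeys(docs))
--     if n == 0:
--         return []
--     counts = {}
--     for d in occ:
--         counts[d] = counts.get(d, 0) + 1
--     inter = [d for d, c in counts.items() if c == n]
--     return sorted(inter if inter else counts)
-- ===== Notes on version B (the rewrite author's own statement) =====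
-- stated objective: alternative
-- what changed: Replaces the set.intersection/set().union calls over per-entity sets by one occurrence-count pass: each non-empty entity contributes its distinct docs once, docs counted n times form the intersection, all counted docs the union fallback.
import Mathlib
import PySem

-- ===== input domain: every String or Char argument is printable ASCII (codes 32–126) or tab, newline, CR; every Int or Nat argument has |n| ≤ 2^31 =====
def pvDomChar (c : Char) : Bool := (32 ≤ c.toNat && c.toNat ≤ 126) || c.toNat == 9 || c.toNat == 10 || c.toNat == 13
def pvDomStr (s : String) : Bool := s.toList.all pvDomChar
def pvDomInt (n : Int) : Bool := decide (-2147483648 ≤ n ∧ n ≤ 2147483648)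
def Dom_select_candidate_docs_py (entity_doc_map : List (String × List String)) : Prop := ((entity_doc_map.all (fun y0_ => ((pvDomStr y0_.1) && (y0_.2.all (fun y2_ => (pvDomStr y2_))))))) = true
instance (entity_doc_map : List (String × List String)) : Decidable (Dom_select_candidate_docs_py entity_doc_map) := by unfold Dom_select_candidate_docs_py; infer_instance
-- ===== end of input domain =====

-- B replaces the explicit set intersection/union over per-entity sets by one occurrence-count
-- pass (count each doc once per non-empty entity, select count == n, fall back to all docs);
-- objective: alternative decomposition, same cost class.


-- ===== PORT A =====
def select_candidate_docs_py (entity_doc_map : List (String × List String)) : List String :=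
  if entity_doc_map.isEmpty then []
  else
    let doc_sets : List (PySem.Set String) :=
      ((entity_doc_map.map (fun kv => kv.2)).filter (fun docs => !docs.isEmpty)).map PySem.Set.ofList
    match doc_sets with
    | [] => []
    | s0 :: rest =>
      let intersected : PySem.Set String :=
        if (s0 :: rest).length > 1 then rest.foldl PySem.Set.inter s0 else s0
      if !intersected.isEmpty then
        PySem.List.sorted intersected (fun x => x) false
      else
        PySem.List.sorted ((s0 :: rest).foldl PySem.Set.union PySem.Set.empty) (fun x => x) false

-- ===== PORT B =====
def select_candidate_docs_py_alt (entity_doc_map : List (String × List String)) : List String :=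
  let acc := entity_doc_map.foldl
    (fun (acc : List String × Int) kv =>
      if kv.2.isEmpty then acc else (acc.1 ++ PySem.List.dedup kv.2, acc.2 + 1))
    ([], 0)
  let occ := acc.1
  let n := acc.2
  if n = 0 then []
  else
    let counts := occ.foldl (fun d x => d.insert x (d.getD x 0 + 1)) PySem.Dict.empty
    let inter := (counts.items.filter (fun p => p.2 == n)).map (fun p => p.1)
    PySem.List.sorted (if inter.isEmpty then counts.keys else inter) (fun x => x) false

-- ===== PRECONDITION & SPEC =====
-- Pre_ excludes association lists with duplicate keys: those do not represent a Python dict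
-- (the dict keeps only the last value per key), so the ports' reading of every entry is
-- not Python's behaviour there.
def Pre_select_candidate_docs_py (entity_doc_map : List (String × List String)) : Prop :=
  (entity_doc_map.map Prod.fst).Nodup
instance (entity_doc_map : List (String × List String)) : Decidable (Pre_select_candidate_docs_py entity_doc_map) := by unfold Pre_select_candidate_docs_py; infer_instance
def pvWitness_select_candidate_docs_py : (List (String × List String)) :=
  [("e1", ["d2", "d1"]), ("e2", ["d1", "d3", "d1"])]
def Spec_select_candidate_docs_py (entity_doc_map : List (String × List String)) (out : List String) : Prop := out = select_candidate_docs_py_alt entity_doc_map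
instance (entity_doc_map : List (String × List String)) (out : List String) : Decidable (Spec_select_candidate_docs_py entity_doc_map out) := by unfold Spec_select_candidate_docs_py; infer_instance

-- ===== CLAIM (what is proved, stated in full; the proofs are below) =====
def Claim_equal_select_candidate_docs_py : Prop := ∀ (entity_doc_map : List (String × List String)), Dom_select_candidate_docs_py entity_doc_map → Pre_select_candidate_docs_py entity_doc_map → Spec_select_candidate_docs_py entity_doc_map (select_candidate_docs_py entity_doc_map)

-- ===== LEMMAS AND PROOFS =====

-- the non-empty doc lists of the map, in order (shared shape of both ports)
def pvS (m : List (String × List String)) : List (List String) :=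
  (m.map (fun kv => kv.2)).filter (fun docs => !docs.isEmpty)

theorem pvFold_spec (m : List (String × List String)) (occ : List String) (n : Int) :
    m.foldl (fun (acc : List String × Int) kv =>
      if kv.2.isEmpty then acc else (acc.1 ++ PySem.List.dedup kv.2, acc.2 + 1)) (occ, n)
    = (occ ++ (pvS m).flatMap PySem.Set.ofList, n + (pvS m).length) := by
  induction m generalizing occ n with
  | nil => simp [pvS]
  | cons kv t ih =>
    simp only [List.foldl_cons]
    by_cases h : kv.2.isEmpty
    · rw [if_pos h, ih]
      simp [pvS, h]
    · rw [if_neg h, ih]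
      simp only [pvS, List.map_cons, List.filter_cons, h, Bool.not_false, if_pos,
        List.flatMap_cons, List.length_cons, PySem.List.dedup_eq_ofList, Prod.ext_iff]
      refine ⟨by simp [List.append_assoc], ?_⟩
      push_cast
      omega

theorem pvCount_flatMap (Sl : List (List String)) (x : String) :
    ((Sl.flatMap PySem.Set.ofList).count x)
      = (Sl.filter (fun docs => decide (x ∈ docs))).length := by
  induction Sl with
  | nil => simp
  | cons d t ih =>
    simp only [List.flatMap_cons, List.count_append, List.filter_cons, ih]
    by_cases h : x ∈ d
    · rw [List.count_eq_one_of_mem (PySem.Set.nodup_ofList _) (by simpa [PySem.Set.mem_ofList])]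
      simp [h]
      omega
    · rw [List.count_eq_zero_of_not_mem (by simpa [PySem.Set.mem_ofList])]
      simp [h]

theorem pvMem_flatMap_ofList (Sl : List (List String)) (x : String) :
    x ∈ Sl.flatMap PySem.Set.ofList ↔ ∃ d ∈ Sl, x ∈ d := by
  simp [List.mem_flatMap, PySem.Set.mem_ofList]

theorem pvMem_foldl_inter (rest : List (PySem.Set String)) (s0 : PySem.Set String) (x : String) :
    x ∈ rest.foldl PySem.Set.inter s0 ↔ x ∈ s0 ∧ ∀ s ∈ rest, x ∈ s := by
  induction rest generalizing s0 with
  | nil => simp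
  | cons s t ih =>
    simp only [List.foldl_cons, ih, PySem.Set.mem_inter, List.mem_cons]
    constructor
    · rintro ⟨⟨h0, hs⟩, hall⟩
      exact ⟨h0, fun u hu => hu.elim (fun e => e ▸ hs) (hall u)⟩
    · rintro ⟨h0, hall⟩
      exact ⟨⟨h0, hall s (Or.inl rfl)⟩, fun u hu => hall u (Or.inr hu)⟩

theorem pvNodup_foldl_inter (rest : List (PySem.Set String)) (s0 : PySem.Set String)
    (h : s0.Nodup) : (rest.foldl PySem.Set.inter s0).Nodup := by
  induction rest generalizing s0 with
  | nil => exact h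
  | cons s t ih => exact ih _ (PySem.Set.nodup_inter s0 s h)

theorem pvMem_foldl_union (l : List (PySem.Set String)) (s : PySem.Set String) (x : String) :
    x ∈ l.foldl PySem.Set.union s ↔ x ∈ s ∨ ∃ t ∈ l, x ∈ t := by
  induction l generalizing s with
  | nil => simp
  | cons u t ih =>
    simp only [List.foldl_cons, ih, PySem.Set.mem_union, List.mem_cons]
    constructor
    · rintro (h | ⟨v, hv, hx⟩)
      · rcases h with h | h
        · exact Or.inl h
        · exact Or.inr ⟨u, Or.inl rfl, h⟩
      · exact Or.inr ⟨v, Or.inr hv, hx⟩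
    · rintro (h | ⟨v, hv, hx⟩)
      · exact Or.inl (Or.inl h)
      · rcases hv with rfl | hv
        · exact Or.inl (Or.inr hx)
        · exact Or.inr ⟨v, hv, hx⟩

theorem pvNodup_foldl_union (l : List (PySem.Set String)) (s : PySem.Set String)
    (h : s.Nodup) : (l.foldl PySem.Set.union s).Nodup := by
  induction l generalizing s with
  | nil => exact h
  | cons u t ih => exact ih _ (PySem.Set.nodup_union s u h)

-- membership in B's count-based intersection, phrased on pvS m
theorem pvMem_interB (Sl : List (List String)) (x : String) :
    x ∈ (PySem.Set.ofList (Sl.flatMap PySem.Set.ofList)).filter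
        (fun k => ((Sl.flatMap PySem.Set.ofList).count k : Int) == (Sl.length : Int))
      ↔ (Sl ≠ [] ∧ ∀ d ∈ Sl, x ∈ d) := by
  simp only [List.mem_filter, PySem.Set.mem_ofList, pvMem_flatMap_ofList, beq_iff_eq,
    Int.natCast_inj, pvCount_flatMap]
  constructor
  · rintro ⟨⟨d, hd, hxd⟩, hlen⟩
    refine ⟨by rintro rfl; simp at hd, ?_⟩
    intro e he
    have := List.length_filter_eq_length_iff.mp hlen e he
    simpa using this
  · rintro ⟨hne, hall⟩
    rcases Sl with _ | ⟨d0, ds⟩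
    · exact absurd rfl hne
    · refine ⟨⟨d0, by simp, hall d0 (by simp)⟩, ?_⟩
      exact List.length_filter_eq_length_iff.mpr (fun e he => by simpa using hall e he)

theorem pvAB (m : List (String × List String)) :
    select_candidate_docs_py m = select_candidate_docs_py_alt m := by
  unfold select_candidate_docs_py select_candidate_docs_py_alt
  rw [pvFold_spec]
  rcases hS : pvS m with _ | ⟨d0, ds⟩
  · -- no non-empty doc list: both return []
    have hA : ((m.map (fun kv => kv.2)).filter (fun docs => !docs.isEmpty)) = [] := hS
    by_cases hm : m.isEmpty
    · simp [hm]
    · simp [hm, hA]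
  · have hm : m.isEmpty = false := by
      cases m with
      | nil => simp [pvS] at hS
      | cons a t => rfl
    have hA : ((m.map (fun kv => kv.2)).filter (fun docs => !docs.isEmpty))
        = d0 :: ds := hS
    rw [hm, hA]
    simp only [Bool.false_eq_true, if_false, List.map_cons, List.nil_append]
    have hn : ¬ ((0 : Int) + ((d0 :: ds).length : Int) = 0) := by
      simp only [List.length_cons]
      push_cast
      omega
    rw [if_neg hn]
    -- name the shared data
    set occ : List String := (d0 :: ds).flatMap PySem.Set.ofList with hocc
    have hcounter : occ.foldl (fun d x => d.insert x (d.getD x 0 + 1)) PySem.Dict.empty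
        = PySem.Dict.counter occ := PySem.Dict.foldl_insert_getD_add_one_eq_counter occ
    rw [hcounter, PySem.Dict.keys_counter, PySem.Dict.items_counter, List.filter_map,
      List.map_map]
    simp only [Function.comp_def, List.map_id']
    -- B's intersection candidate list
    set interB : List String := (PySem.Set.ofList occ).filter
        (fun k => ((occ.count k : Int) == (0 : Int) + ((d0 :: ds).length : Int))) with hIB
    have hcast : ((0 : Int) + ((d0 :: ds).length : Int)) = ((d0 :: ds).length : Int) := by
      omega
    have hmemB : ∀ x, x ∈ interB ↔ ((d0 :: ds) ≠ [] ∧ ∀ d ∈ (d0 :: ds), x ∈ d) := by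
      intro x
      rw [hIB, hocc]
      simp only [hcast]
      exact pvMem_interB (d0 :: ds) x
    -- A's intersected set
    set interA : PySem.Set String :=
      (if (PySem.Set.ofList d0 :: List.map PySem.Set.ofList ds).length > 1 then
        List.foldl PySem.Set.inter (PySem.Set.ofList d0) (List.map PySem.Set.ofList ds)
      else PySem.Set.ofList d0) with hIA
    have hAfold : interA
        = List.foldl PySem.Set.inter (PySem.Set.ofList d0) (List.map PySem.Set.ofList ds) := by
      rw [hIA]
      rcases ds with _ | ⟨e, es⟩
      · simp
      · simp
    have hmemA : ∀ x, x ∈ interA ↔ (∀ d ∈ (d0 :: ds), x ∈ d) := by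
      intro x
      rw [hAfold, pvMem_foldl_inter]
      simp only [PySem.Set.mem_ofList, List.mem_map, List.mem_cons]
      constructor
      · rintro ⟨h0, hrest⟩ d (rfl | hd)
        · exact h0
        · simpa [PySem.Set.mem_ofList] using hrest _ ⟨d, hd, rfl⟩
      · intro hall
        refine ⟨hall d0 (Or.inl rfl), ?_⟩
        rintro s ⟨d, hd, rfl⟩
        simpa [PySem.Set.mem_ofList] using hall d (Or.inr hd)
    have hnodupA : interA.Nodup := by
      rw [hAfold]
      exact pvNodup_foldl_inter _ _ (PySem.Set.nodup_ofList d0)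
    have hnodupB : interB.Nodup := by
      rw [hIB]
      exact List.Nodup.filter _ (PySem.Set.nodup_ofList occ)
    by_cases hEmpty : interA.isEmpty
    · -- intersection empty on both sides: union fallback vs all counted keys
      have hAnil : interA = [] := List.isEmpty_iff.mp hEmpty
      have hBnil : interB = [] := by
        rw [List.eq_nil_iff_forall_not_mem]
        intro x hx
        have := (hmemA x).mpr ((hmemB x).mp hx).2
        simp [hAnil] at this
      rw [hEmpty, hBnil]
      simp only [Bool.not_true, Bool.false_eq_true, if_false, List.isEmpty_nil, if_true]
      rw [PySem.List.sorted_id_eq_sorted_id_iff_perm]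
      rw [List.perm_ext_iff_of_nodup
        (pvNodup_foldl_union _ _ (by simp [PySem.Set.empty]))
        (PySem.Set.nodup_ofList occ)]
      intro x
      rw [pvMem_foldl_union]
      simp only [PySem.Set.mem_ofList, hocc, pvMem_flatMap_ofList, List.mem_cons,
        List.mem_map, PySem.Set.empty]
      constructor
      · rintro (h | ⟨s, hs, hx⟩)
        · simp at h
        · rcases hs with rfl | ⟨d, hd, rfl⟩
          · exact ⟨d0, Or.inl rfl, (PySem.Set.mem_ofList _ _).mp hx⟩
          · exact ⟨d, Or.inr hd, (PySem.Set.mem_ofList _ _).mp hx⟩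
      · rintro ⟨d, (rfl | hd), hx⟩
        · exact Or.inr ⟨PySem.Set.ofList d, Or.inl rfl, (PySem.Set.mem_ofList _ _).mpr hx⟩
        · exact Or.inr ⟨PySem.Set.ofList d, Or.inr ⟨d, hd, rfl⟩, (PySem.Set.mem_ofList _ _).mpr hx⟩
    · -- non-empty intersection on both sides
      have hAe : interA.isEmpty = false := by simpa using hEmpty
      have hAne : interA ≠ [] := by
        intro h
        rw [h] at hAe
        simp at hAe
      obtain ⟨x, hx⟩ := List.exists_mem_of_ne_nil _ hAne
      have hxB : x ∈ interB := (hmemB x).mpr ⟨by simp, (hmemA x).mp hx⟩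
      have hBne : interB.isEmpty = false := by
        cases hb : interB with
        | nil => rw [hb] at hxB; simp at hxB
        | cons a l => rfl
      rw [hAe, hBne]
      simp only [Bool.not_false, if_true, Bool.false_eq_true, if_false]
      rw [PySem.List.sorted_id_eq_sorted_id_iff_perm]
      rw [List.perm_ext_iff_of_nodup hnodupA hnodupB]
      intro x
      rw [hmemA x, hmemB x]
      simp

-- ===== VERDICT (by name: the statement is the Claim_ definition above) =====
theorem select_candidate_docs_py_spec : Claim_equal_select_candidate_docs_py := by
  intro m _ _
  unfold Spec_select_candidate_docs_py
  exact pvAB m
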